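-- pv_equiv track=rewrite | github.com/PatilAnoj/python | Day-8/problem1.py | log_api_requests
-- ===== SOURCE A (Python) =====
-- def log_api_requests(requests):
--     request_dict=dict()
--     for element in requests:
--        if element[0] not in request_dict:
--            request_dict[element[0]]=dict()
--            request_dict[element[0]][element[1]]=1
--        else:
--            if element[1] not in request_dict[element[0]]:
--                request_dict[element[0]][element[1]]=1
--            else:
--                request_dict[element[0]][element[1]]+=1
--     return request_dict
-- ===== SOURCE B (Python) =====
-- def log_api_requests(requests):
--     # One flat pass tallying (key, subkey) pairs, then one pass nesting the table.
--     flat = {}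
--     for pair in requests:
--         flat[pair] = flat.get(pair, 0) + 1
--     result = {}
--     for (key, sub), n in flat.items():
--         result.setdefault(key, {})[sub] = n
--     return result
-- ===== Notes on version B (the rewrite author's own statement) =====
-- stated objective: alternative
-- what changed: B replaces A's interleaved nested-dict branching (four in-loop cases) with two independent passes: a flat tally dict keyed by the whole (key, subkey) pair, then a nesting pass over the tally's items using setdefault.
import Mathlib
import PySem

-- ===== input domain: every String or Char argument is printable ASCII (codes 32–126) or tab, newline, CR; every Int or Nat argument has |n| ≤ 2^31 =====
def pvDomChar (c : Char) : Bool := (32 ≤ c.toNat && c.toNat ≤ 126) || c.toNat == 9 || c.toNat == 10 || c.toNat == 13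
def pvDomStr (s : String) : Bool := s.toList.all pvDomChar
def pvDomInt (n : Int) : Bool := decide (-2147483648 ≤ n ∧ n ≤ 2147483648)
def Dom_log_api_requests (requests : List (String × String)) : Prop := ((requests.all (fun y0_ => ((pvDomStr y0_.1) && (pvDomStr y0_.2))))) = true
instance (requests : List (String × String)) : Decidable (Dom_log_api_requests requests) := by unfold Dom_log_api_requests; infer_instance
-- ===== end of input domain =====

-- B builds a flat (key,subkey)→count tally in one pass, then nests it in a second pass; same value as A.

-- ===== PORT A =====
-- one loop iteration of A: the four-way branch on outer/inner membership
def pvStepA (d : PySem.Dict String (PySem.Dict String Int)) (e : String × String) :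
    PySem.Dict String (PySem.Dict String Int) :=
  if d.contains e.1 = false then
    d.insert e.1 ((PySem.Dict.empty).insert e.2 1)
  else
    if (d.getD e.1 PySem.Dict.empty).contains e.2 = false then
      d.insert e.1 ((d.getD e.1 PySem.Dict.empty).insert e.2 1)
    else
      d.insert e.1 ((d.getD e.1 PySem.Dict.empty).insert e.2
        ((d.getD e.1 PySem.Dict.empty).getD e.2 0 + 1))

def log_api_requests (requests : List (String × String)) : List (String × List (String × Int)) :=
  ((requests.foldl pvStepA PySem.Dict.empty).items).map (fun p => (p.1, p.2.items))

-- ===== PORT B =====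
-- second-pass iteration of B: result.setdefault(key, {})[sub] = n
def pvNestStep (r : PySem.Dict String (PySem.Dict String Int)) (q : (String × String) × Int) :
    PySem.Dict String (PySem.Dict String Int) :=
  (r.setdefault q.1.1 PySem.Dict.empty).insert q.1.1
    (((r.setdefault q.1.1 PySem.Dict.empty).getD q.1.1 PySem.Dict.empty).insert q.1.2 q.2)

def pvFlat (requests : List (String × String)) : PySem.Dict (String × String) Int :=
  requests.foldl (fun c p => c.insert p (c.getD p 0 + 1)) PySem.Dict.empty

def log_api_requests_alt (requests : List (String × String)) : List (String × List (String × Int)) :=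
  (((pvFlat requests).items.foldl pvNestStep PySem.Dict.empty).items).map (fun p => (p.1, p.2.items))

-- ===== PRECONDITION & SPEC =====
def Spec_log_api_requests (requests : List (String × String)) (out : List (String × List (String × Int))) : Prop := out = log_api_requests_alt requests
instance (requests : List (String × String)) (out : List (String × List (String × Int))) : Decidable (Spec_log_api_requests requests out) := by unfold Spec_log_api_requests; infer_instance

-- ===== CLAIM (what is proved, stated in full; the proofs are below) =====
def Claim_equal_log_api_requests : Prop := ∀ (requests : List (String × String)), Dom_log_api_requests requests → Spec_log_api_requests requests (log_api_requests requests)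

-- ===== LEMMAS AND PROOFS =====
-- one fold step of B's nesting pass, read through getD
lemma pv_getD_nestStep (d : PySem.Dict String (PySem.Dict String Int))
    (q : (String × String) × Int) (k : String) :
    (pvNestStep d q).getD k PySem.Dict.empty
      = if k = q.1.1 then (d.getD q.1.1 PySem.Dict.empty).insert q.1.2 q.2
        else d.getD k PySem.Dict.empty := by
  unfold pvNestStep
  by_cases hc : d.contains q.1.1
  · simp [PySem.Dict.setdefault_of_contains _ _ hc, PySem.Dict.getD_insert]
  · have hc' : d.contains q.1.1 = false := by simpa using hc
    rw [PySem.Dict.setdefault_of_not_contains _ _ hc']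
    by_cases hk : k = q.1.1
    · subst hk
      simp [PySem.Dict.getD_of_not_contains _ _ hc']
    · simp [PySem.Dict.getD_insert, hk]

lemma pv_contains_nestStep (d : PySem.Dict String (PySem.Dict String Int))
    (q : (String × String) × Int) (k : String) :
    (pvNestStep d q).contains k = (k == q.1.1 || d.contains k) := by
  unfold pvNestStep
  by_cases h : k = q.1.1 <;>
    simp [h, PySem.Dict.contains_insert, PySem.Dict.contains_setdefault]

lemma pv_inner_contains_foldl : ∀ (l : List ((String × String) × Int))
    (d : PySem.Dict String (PySem.Dict String Int)) (k s : String),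
    ((l.foldl pvNestStep d).getD k PySem.Dict.empty).contains s
      = (((d.getD k PySem.Dict.empty).contains s) || l.any (fun q => q.1 == (k, s)))
  | [], d, k, s => by simp
  | ⟨⟨a, b⟩, n⟩ :: l, d, k, s => by
      rw [List.foldl_cons, pv_inner_contains_foldl l, pv_getD_nestStep]
      by_cases hk : k = a
      · subst hk
        by_cases hs : s = b
        · subst hs
          simp
        · have hbe : ((k, b) == (k, s)) = false :=
            beq_eq_false_iff_ne.mpr (fun h => hs (congrArg Prod.snd h).symm)
          have hsb : (s == b) = false := beq_eq_false_iff_ne.mpr hs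
          simp [PySem.Dict.contains_insert, hbe, hsb]
      · have hbe : (((a, b) : String × String) == (k, s)) = false :=
          beq_eq_false_iff_ne.mpr (fun h => hk (congrArg Prod.fst h).symm)
        simp [hk, hbe]

lemma pv_insert_comm {κ ν : Type} [BEq κ] [LawfulBEq κ] (d : PySem.Dict κ ν)
    (k k' : κ) (v v' : ν) (h : d.contains k = true) (hne : k' ≠ k) :
    (d.insert k v).insert k' v' = (d.insert k' v').insert k v := by
  have h2 : (d.insert k' v').contains k = true := by
    rw [PySem.Dict.contains_insert]; simp [h]
  by_cases hc' : d.contains k'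
  · have h1 : (d.insert k v).contains k' = true := by
      rw [PySem.Dict.contains_insert]; simp [hc']
    apply PySem.Dict.ext
    rw [PySem.Dict.items_insert_of_contains _ _ h1,
        PySem.Dict.items_insert_of_contains _ _ h,
        PySem.Dict.items_insert_of_contains _ _ h2,
        PySem.Dict.items_insert_of_contains _ _ hc',
        List.map_map, List.map_map]
    refine List.map_congr_left (fun p _ => ?_)
    by_cases hpk : p.1 = k <;> by_cases hpk' : p.1 = k' <;>
      simp [Function.comp, hpk, hpk', hne, Ne.symm hne]
  · have hc'' : d.contains k' = false := by simpa using hc'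
    have h1 : (d.insert k v).contains k' = false := by
      rw [PySem.Dict.contains_insert]; simp [hc'', hne]
    apply PySem.Dict.ext
    rw [PySem.Dict.items_insert_of_not_contains _ _ h1,
        PySem.Dict.items_insert_of_contains _ _ h,
        PySem.Dict.items_insert_of_contains _ _ h2,
        PySem.Dict.items_insert_of_not_contains _ _ hc'',
        List.map_append]
    simp [hne]


-- fresh pair: B's nesting step with count 1 is A's step
lemma pv_fresh (l : List ((String × String) × Int)) (e : String × String)
    (hl : ∀ q ∈ l, q.1 ≠ e) :
    pvNestStep (l.foldl pvNestStep PySem.Dict.empty) (e, 1)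
      = pvStepA (l.foldl pvNestStep PySem.Dict.empty) e := by
  set d := l.foldl pvNestStep PySem.Dict.empty with hd
  have hinner : (d.getD e.1 PySem.Dict.empty).contains e.2 = false := by
    rw [hd, pv_inner_contains_foldl]
    simp only [PySem.Dict.getD_empty, PySem.Dict.contains_empty, Bool.false_or]
    simp only [List.any_eq_false]
    intro q hq
    simpa using hl q hq
  unfold pvStepA pvNestStep
  by_cases hc : d.contains e.1
  · rw [if_neg (by simp [hc]), PySem.Dict.setdefault_of_contains _ _ hc]
    simp [hinner]
  · have hc' : d.contains e.1 = false := by simpa using hc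
    rw [if_pos hc', PySem.Dict.setdefault_of_not_contains _ _ hc']
    rw [PySem.Dict.insert_insert_self]
    congr 1
    simp

-- A's step immediately after B nested (e, w) bumps the count to w+1
lemma pv_stepA_nestStep_self (d : PySem.Dict String (PySem.Dict String Int))
    (e : String × String) (w : Int) :
    pvStepA (pvNestStep d (e, w)) e = pvNestStep d (e, w + 1) := by
  unfold pvStepA pvNestStep
  rw [if_neg (by simp)]
  rw [if_neg (by simp [PySem.Dict.getD_insert_self])]
  simp [PySem.Dict.getD_insert_self, PySem.Dict.insert_insert_self]

-- A's step at pair e commutes past one B-nesting step for a pair ≠ e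
lemma pv_comm (d : PySem.Dict String (PySem.Dict String Int))
    (e : String × String) (q : (String × String) × Int)
    (hq : q.1 ≠ e) (H1 : d.contains e.1 = true)
    (H2 : (d.getD e.1 PySem.Dict.empty).contains e.2 = true) :
    pvStepA (pvNestStep d q) e = pvNestStep (pvStepA d e) q := by
  by_cases hk : q.1.1 = e.1
  · -- same outer key, different subkey
    have hs : q.1.2 ≠ e.2 := by
      intro hs; exact hq (Prod.ext hk hs)
    have hcq : d.contains q.1.1 = true := hk ▸ H1
    have LHS :
        pvNestStep d q = d.insert e.1 ((d.getD e.1 PySem.Dict.empty).insert q.1.2 q.2) := by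
      unfold pvNestStep
      rw [PySem.Dict.setdefault_of_contains _ _ hcq, hk]
    have hw : (d.getD e.1 PySem.Dict.empty).getD e.2 0
        = ((d.getD e.1 PySem.Dict.empty).insert q.1.2 q.2).getD e.2 0 := by
      rw [PySem.Dict.getD_insert_of_ne _ _ _ (Ne.symm hs)]
    have RA : pvStepA d e
        = d.insert e.1 ((d.getD e.1 PySem.Dict.empty).insert e.2
            ((d.getD e.1 PySem.Dict.empty).getD e.2 0 + 1)) := by
      unfold pvStepA
      rw [if_neg (by simp [H1]), if_neg (by simp [H2])]
    rw [LHS, RA]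
    unfold pvStepA pvNestStep
    rw [if_neg (by simp [PySem.Dict.contains_insert_self])]
    rw [PySem.Dict.getD_insert_self]
    rw [if_neg (by simp [PySem.Dict.contains_insert, H2])]
    rw [PySem.Dict.setdefault_of_contains _ _ (by rw [PySem.Dict.contains_insert]; simp [hcq]), hk]
    rw [PySem.Dict.getD_insert_self, PySem.Dict.insert_insert_self, PySem.Dict.insert_insert_self,
        ← hw, pv_insert_comm _ _ _ _ _ H2 hs]
  · -- different outer keys
    have hk' : q.1.1 ≠ e.1 := hk
    have RA : pvStepA d e
        = d.insert e.1 ((d.getD e.1 PySem.Dict.empty).insert e.2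
            ((d.getD e.1 PySem.Dict.empty).getD e.2 0 + 1)) := by
      unfold pvStepA
      rw [if_neg (by simp [H1]), if_neg (by simp [H2])]
    by_cases hcq : d.contains q.1.1
    · have LHS :
          pvNestStep d q = d.insert q.1.1 ((d.getD q.1.1 PySem.Dict.empty).insert q.1.2 q.2) := by
        unfold pvNestStep
        rw [PySem.Dict.setdefault_of_contains _ _ hcq]
      have hAc : (pvStepA d e).contains q.1.1 = true := by
        rw [RA, PySem.Dict.contains_insert]; simp [hcq]
      have RHS :
          pvNestStep (pvStepA d e) q
            = (pvStepA d e).insert q.1.1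
                (((pvStepA d e).getD q.1.1 PySem.Dict.empty).insert q.1.2 q.2) := by
        unfold pvNestStep
        rw [PySem.Dict.setdefault_of_contains _ _ hAc]
      rw [LHS, RHS, RA]
      rw [PySem.Dict.getD_insert_of_ne _ _ _ hk']
      unfold pvStepA
      rw [if_neg (by simp [PySem.Dict.contains_insert, H1])]
      rw [PySem.Dict.getD_insert_of_ne _ _ _ (Ne.symm hk')]
      rw [if_neg (by simp [H2])]
      exact pv_insert_comm d q.1.1 e.1 _ _ hcq (Ne.symm hk')
    · have hcq' : d.contains q.1.1 = false := by simpa using hcq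
      have LHS :
          pvNestStep d q = d.insert q.1.1 ((PySem.Dict.empty).insert q.1.2 q.2) := by
        unfold pvNestStep
        rw [PySem.Dict.setdefault_of_not_contains _ _ hcq']
        rw [PySem.Dict.getD_insert_self, PySem.Dict.insert_insert_self]
      have hAc : (pvStepA d e).contains q.1.1 = false := by
        rw [RA, PySem.Dict.contains_insert]; simp [hcq', hk']
      have RHS :
          pvNestStep (pvStepA d e) q
            = (pvStepA d e).insert q.1.1 ((PySem.Dict.empty).insert q.1.2 q.2) := by
        unfold pvNestStep
        rw [PySem.Dict.setdefault_of_not_contains _ _ hAc]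
        rw [PySem.Dict.getD_insert_self, PySem.Dict.insert_insert_self]
      rw [LHS, RHS, RA]
      unfold pvStepA
      rw [if_neg (by simp [PySem.Dict.contains_insert, H1])]
      rw [PySem.Dict.getD_insert_of_ne _ _ _ (Ne.symm hk')]
      rw [if_neg (by simp [H2])]
      exact (pv_insert_comm _ _ _ _ _ H1 hk').symm

lemma pv_foldl_comm : ∀ (l : List ((String × String) × Int))
    (d : PySem.Dict String (PySem.Dict String Int)) (e : String × String),
    (∀ q ∈ l, q.1 ≠ e) → d.contains e.1 = true →
    (d.getD e.1 PySem.Dict.empty).contains e.2 = true →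
    pvStepA (l.foldl pvNestStep d) e = l.foldl pvNestStep (pvStepA d e)
  | [], d, e, _, _, _ => rfl
  | q :: l, d, e, hl, H1, H2 => by
      rw [List.foldl_cons, List.foldl_cons]
      have H1' : (pvNestStep d q).contains e.1 = true := by
        rw [pv_contains_nestStep]; simp [H1]
      have H2' : ((pvNestStep d q).getD e.1 PySem.Dict.empty).contains e.2 = true := by
        rw [pv_getD_nestStep]
        by_cases hk : e.1 = q.1.1
        · rw [if_pos hk, PySem.Dict.contains_insert, ← hk]
          simp [H2]
        · rw [if_neg hk]; exact H2
      rw [pv_foldl_comm l _ e (fun a ha => hl a (List.mem_cons_of_mem _ ha)) H1' H2']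
      rw [pv_comm d e q (hl q List.mem_cons_self) H1 H2]

-- the core: one counter update on the flat dict is one A-step on the nested result
lemma pv_core (c : PySem.Dict (String × String) Int) (hnd : c.keys.Nodup) (e : String × String) :
    (c.insert e (c.getD e 0 + 1)).items.foldl pvNestStep PySem.Dict.empty
      = pvStepA (c.items.foldl pvNestStep PySem.Dict.empty) e := by
  by_cases hc : c.contains e
  · -- e already counted: in-place bump, commute past the tail
    obtain ⟨w, hw⟩ : ∃ w, c.get? e = some w := by
      have := PySem.Dict.contains_eq_isSome_get? c e
      rw [hc] at this
      exact Option.isSome_iff_exists.mp this.symm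
    have hmem : (e, w) ∈ c.items := PySem.Dict.mem_items_of_get?_eq_some c hw
    obtain ⟨s, t, hst⟩ := List.append_of_mem hmem
    have hkeys : ((s.map Prod.fst) ++ e :: (t.map Prod.fst)).Nodup := by
      have hck : c.keys = (s.map Prod.fst) ++ e :: (t.map Prod.fst) := by
        simp [PySem.Dict.keys, hst]
      rw [← hck]; exact hnd
    obtain ⟨hk1, hk2, hdisj⟩ := List.nodup_append.mp hkeys
    have hse : ∀ p ∈ s, p.1 ≠ e := by
      intro p hp hpe
      have hmm : p.1 ∈ s.map Prod.fst := List.mem_map_of_mem hp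
      rw [hpe] at hmm
      exact hdisj e hmm e List.mem_cons_self rfl
    have hte : ∀ p ∈ t, p.1 ≠ e := by
      intro p hp hpe
      have hmm : p.1 ∈ t.map Prod.fst := List.mem_map_of_mem hp
      rw [hpe] at hmm
      exact (List.nodup_cons.mp hk2).1 hmm
    have hgd : c.getD e 0 = w := PySem.Dict.getD_of_mem_items c hmem hnd 0
    have hitems : (c.insert e (c.getD e 0 + 1)).items = s ++ (e, w + 1) :: t := by
      rw [PySem.Dict.items_insert_of_contains _ _ hc, hst, hgd]
      rw [List.map_append, List.map_cons]
      have hmapfix : ∀ (u : List ((String × String) × Int)), (∀ p ∈ u, p.1 ≠ e) →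
          u.map (fun p => if (p.1 == e) = true then (e, w + 1) else p) = u := by
        intro u hu
        calc u.map (fun p => if (p.1 == e) = true then (e, w + 1) else p)
            = u.map id := List.map_congr_left (fun p hp => by simp [hu p hp])
          _ = u := List.map_id _
      rw [hmapfix s hse, hmapfix t hte]
      simp
    rw [hitems, hst]
    rw [List.foldl_append, List.foldl_append, List.foldl_cons, List.foldl_cons]
    have H1 : (pvNestStep (s.foldl pvNestStep PySem.Dict.empty) (e, w)).contains e.1 = true := by
      unfold pvNestStep; exact PySem.Dict.contains_insert_self _ _ _
    have H2 : ((pvNestStep (s.foldl pvNestStep PySem.Dict.empty) (e, w)).getD e.1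
        PySem.Dict.empty).contains e.2 = true := by
      unfold pvNestStep
      rw [PySem.Dict.getD_insert_self]
      exact PySem.Dict.contains_insert_self _ _ _
    rw [pv_foldl_comm t _ e hte H1 H2, pv_stepA_nestStep_self]
  · -- fresh pair: append (e, 1) and absorb it as A's step
    have hc' : c.contains e = false := by simpa using hc
    have hce : ∀ p ∈ c.items, p.1 ≠ e := by
      intro p hp hpe
      have : e ∈ c.keys := by
        rw [PySem.Dict.keys]
        have hmm : p.1 ∈ c.items.map Prod.fst := List.mem_map_of_mem hp
        rwa [hpe] at hmm
      rw [← PySem.Dict.contains_iff_mem_keys] at this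
      rw [this] at hc'; cases hc'
    rw [PySem.Dict.getD_of_not_contains _ _ hc',
        PySem.Dict.items_insert_of_not_contains _ _ hc', List.foldl_append,
        List.foldl_cons, List.foldl_nil]
    norm_num
    exact pv_fresh c.items e hce

lemma pv_flat_snoc (l : List (String × String)) (e : String × String) :
    pvFlat (l ++ [e]) = (pvFlat l).insert e ((pvFlat l).getD e 0 + 1) := by
  unfold pvFlat
  rw [List.foldl_append, List.foldl_cons, List.foldl_nil]

lemma pv_flat_nodup (l : List (String × String)) : (pvFlat l).keys.Nodup := by
  unfold pvFlat
  exact PySem.Dict.nodup_keys_foldl_insert l (fun c p => c.getD p 0 + 1) _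
    PySem.Dict.nodup_keys_empty


theorem log_api_requests_main : ∀ (requests : List (String × String)),
    requests.foldl pvStepA PySem.Dict.empty
      = (pvFlat requests).items.foldl pvNestStep PySem.Dict.empty := by
  intro requests
  induction requests using List.reverseRecOn with
  | nil => rfl
  | append_singleton l e ih =>
      rw [List.foldl_append, List.foldl_cons, List.foldl_nil, ih, pv_flat_snoc,
          pv_core (pvFlat l) (pv_flat_nodup l) e]

-- ===== VERDICT (by name: the statement is the Claim_ definition above) =====
theorem log_api_requests_spec : Claim_equal_log_api_requests := by
  intro requests _
  unfold Spec_log_api_requests log_api_requests log_api_requests_alt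
  rw [log_api_requests_main]
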